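-- pv_equiv track=rewrite | github.com/007gzs/django-cool | cool/core/utils.py | split_camel_name
-- ===== SOURCE A (Python) =====
-- def split_camel_name(name, fall=False):
--     """
--     驼峰命名分割为单词
--
--     GenerateURLs => [Generate, URLs]
--     generateURLsLite => [generate, URLs, Lite]
--     """
--     if not name:
--         return []
--
--     lastest_upper = name[0].isupper()
--     idx_list = []
--     for idx, char in enumerate(name):
--         upper = char.isupper()
--         # rising
--         if upper and not lastest_upper:
--             idx_list.append(idx)
--         # falling
--         elif fall and not upper and lastest_upper:
--             idx_list.append(idx-1)
--         lastest_upper = upper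
--
--     l_idx = 0
--     name_items = []
--     for r_idx in idx_list:
--         if name[l_idx:r_idx]:
--             name_items.append(name[l_idx:r_idx])
--         l_idx = r_idx
--     if name[l_idx:]:
--         name_items.append(name[l_idx:])
--
--     return name_items
-- ===== SOURCE B (Python) =====
-- def split_camel_name(name, fall=False):
--     """Single fused pass with a start pointer: slice words out while scanning,
--     instead of collecting an index list first and slicing in a second pass."""
--     words = []
--     start = 0
--     for t in range(1, len(name)):
--         cur_up = name[t].isupper()
--         prev_up = name[t - 1].isupper()
--         if cur_up and not prev_up:
--             words.append(name[start:t])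
--             start = t
--         elif fall and not cur_up and prev_up and t - 1 > start:
--             words.append(name[start:t - 1])
--             start = t - 1
--     if name[start:]:
--         words.append(name[start:])
--     return words
-- ===== Notes on version B (the rewrite author's own statement) =====
-- stated objective: alternative
-- what changed: Replaces A's two-pass design (first collect a cut-index list while carrying a lastest_upper flag, then slice between the collected indices in a second loop) with a single fused scan that compares adjacent characters directly and slices each word out immediately using a running start pointer; no index list and no carried case flag.
import Mathlib
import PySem

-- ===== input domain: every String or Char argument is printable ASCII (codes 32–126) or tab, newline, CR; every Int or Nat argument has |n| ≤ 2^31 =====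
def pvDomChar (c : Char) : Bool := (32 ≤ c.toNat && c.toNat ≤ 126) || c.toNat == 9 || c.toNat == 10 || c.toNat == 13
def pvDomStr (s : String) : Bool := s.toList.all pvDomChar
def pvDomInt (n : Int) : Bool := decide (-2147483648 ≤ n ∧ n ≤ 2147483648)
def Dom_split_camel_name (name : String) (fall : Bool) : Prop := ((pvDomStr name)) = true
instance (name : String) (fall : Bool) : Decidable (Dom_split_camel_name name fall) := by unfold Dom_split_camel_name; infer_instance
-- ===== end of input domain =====

-- B replaces A's two-pass index-list-then-slice structure by one fused scan with a
-- start pointer (objective: alternative decomposition, same O(n) cost).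

-- ===== PORT A =====
-- step of A's first loop: state (lastest_upper, idx_list), input one (idx, char) pair
def aCollect (fall : Bool) (st : Bool × List Int) (p : Int × Char) : Bool × List Int :=
  let upper := PySem.Chars.isupper p.2
  if upper && !st.1 then (upper, st.2 ++ [p.1])
  else if fall && !upper && st.1 then (upper, st.2 ++ [p.1 - 1])
  else (upper, st.2)

-- step of A's second loop: state (l_idx, name_items); appends name[l_idx:r_idx] if nonempty
def aSlice (s : List Char) (st : Int × List String) (r : Int) : Int × List String :=
  let w := PySem.List.slice s (some st.1) (some r)
  (r, if w.isEmpty then st.2 else st.2 ++ [String.ofList w])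

def split_camel_name (name : String) (fall : Bool) : List String :=
  let s := name.toList
  match s with
  | [] => []                                     -- if not name: return []
  | c :: _ =>
    let init := PySem.Chars.isupper c            -- lastest_upper = name[0].isupper()
    let idxList := ((PySem.List.enumerate s 0).foldl (aCollect fall) (init, [])).2
    let fin := idxList.foldl (aSlice s) (0, [])
    let tailw := PySem.List.slice s (some fin.1) none
    if tailw.isEmpty then fin.2 else fin.2 ++ [String.ofList tailw]

-- ===== PORT B =====
-- step of B's single loop: state (start, words), input the scan index t (1 ≤ t < len;
-- pyGetD stands for name[t] / name[t-1], always in range here)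
def bStep (s : List Char) (fall : Bool) (st : Int × List String) (t : Int) : Int × List String :=
  let curUp := PySem.Chars.isupper (PySem.List.pyGetD s t ' ')
  let prevUp := PySem.Chars.isupper (PySem.List.pyGetD s (t - 1) ' ')
  if curUp && !prevUp then
    (t, st.2 ++ [String.ofList (PySem.List.slice s (some st.1) (some t))])
  else if fall && !curUp && prevUp && decide (st.1 < t - 1) then
    (t - 1, st.2 ++ [String.ofList (PySem.List.slice s (some st.1) (some (t - 1)))])
  else st

def split_camel_name_alt (name : String) (fall : Bool) : List String :=
  let s := name.toList
  let fin := (PySem.List.pyRange 1 (s.length : Int) 1).foldl (bStep s fall) (0, [])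
  let tailw := PySem.List.slice s (some fin.1) none
  if tailw.isEmpty then fin.2 else fin.2 ++ [String.ofList tailw]

-- ===== PRECONDITION & SPEC =====
def Spec_split_camel_name (name : String) (fall : Bool) (out : List String) : Prop := out = split_camel_name_alt name fall
instance (name : String) (fall : Bool) (out : List String) : Decidable (Spec_split_camel_name name fall out) := by unfold Spec_split_camel_name; infer_instance

-- ===== CLAIM (what is proved, stated in full; the proofs are below) =====
def Claim_equal_split_camel_name : Prop := ∀ (name : String) (fall : Bool), Dom_split_camel_name name fall → Spec_split_camel_name name fall (split_camel_name name fall)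

-- ===== LEMMAS AND PROOFS =====

-- the cut indices A's first loop emits, split out per scan position k
def cuts (fall : Bool) : List Char → Nat → Bool → List Int
  | [], _, _ => []
  | c :: cs, k, b =>
    (if PySem.Chars.isupper c && !b then [(k : Int)]
     else if fall && !(PySem.Chars.isupper c) && b then [(k : Int) - 1]
     else []) ++ cuts fall cs (k + 1) (PySem.Chars.isupper c)

-- final lastest_upper value of A's first loop
def lastU : List Char → Bool → Bool
  | [], b => b
  | c :: cs, _ => lastU cs (PySem.Chars.isupper c)

-- the common tail step: append name[l:] if nonempty
def finTail (s : List Char) (st : Int × List String) : List String :=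
  let tailw := PySem.List.slice s (some st.1) none
  if tailw.isEmpty then st.2 else st.2 ++ [String.ofList tailw]

lemma collect_eq (fall : Bool) : ∀ (xs : List Char) (k : Nat) (b : Bool) (acc : List Int),
    (PySem.List.enumerate xs (k : Int)).foldl (aCollect fall) (b, acc)
      = (lastU xs b, acc ++ cuts fall xs k b) := by
  intro xs
  induction xs with
  | nil => intro k b acc; simp [cuts, lastU, PySem.List.enumerate]
  | cons c cs ih =>
    intro k b acc
    rw [PySem.List.enumerate_cons]
    have hk : (k : Int) + 1 = ((k + 1 : Nat) : Int) := by push_cast; ring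
    simp only [List.foldl_cons, aCollect, hk, lastU, cuts]
    split_ifs with h1 h2 <;> rw [ih] <;> simp

lemma slice_nonempty (s : List Char) (l k : Nat) (hl : l < k) (hk : k ≤ s.length) :
    (PySem.List.slice s (some (l : Int)) (some (k : Int))).isEmpty = false := by
  rw [PySem.List.slice_natCast]
  simp only [List.isEmpty_eq_false_iff]
  apply List.ne_nil_of_length_pos
  simp only [List.length_take, List.length_drop]
  omega

lemma getD_eq_getElem (s : List Char) (k : Nat) (hk : k < s.length) :
    s.getD k ' ' = s[k] := by
  simp [List.getD_eq_getElem?_getD, List.getElem?_eq_getElem hk]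

-- MAIN: from scan position k on, A's remaining cut processing and B's remaining scan
-- produce the same final answer, given the shared state (l, items) with l ≤ k - 1.
set_option maxHeartbeats 2000000 in
lemma main_lemma (fall : Bool) (s : List Char) :
    ∀ (m k l : Nat) (items : List String),
    s.length - k = m → 1 ≤ k → l + 1 ≤ k →
    finTail s ((cuts fall (s.drop k) k (PySem.Chars.isupper (s.getD (k - 1) ' '))).foldl
        (aSlice s) ((l : Int), items))
      = finTail s ((PySem.List.pyRange (k : Int) (s.length : Int) 1).foldl
        (bStep s fall) ((l : Int), items)) := by
  intro m
  induction m with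
  | zero =>
    intro k l items hm hk hl
    have hdrop : s.drop k = [] := by
      apply List.drop_eq_nil_of_le; omega
    have hrange : PySem.List.pyRange (k : Int) (s.length : Int) 1 = [] := by
      apply PySem.List.pyRange_one_eq_nil; exact_mod_cast Nat.le_of_sub_eq_zero hm
    rw [hdrop, hrange]; simp [cuts]
  | succ m ih =>
    intro k l items hm hk hl
    have hkn : k < s.length := by omega
    have hdrop : s.drop k = s[k] :: s.drop (k + 1) := List.drop_eq_getElem_cons hkn
    have hrange : PySem.List.pyRange (k : Int) (s.length : Int) 1
        = (k : Int) :: PySem.List.pyRange ((k : Int) + 1) (s.length : Int) 1 := by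
      apply PySem.List.pyRange_one_cons; exact_mod_cast hkn
    have hk1 : ((k : Int) + 1) = ((k + 1 : Nat) : Int) := by push_cast; ring
    have hprev : PySem.List.pyGetD s ((k : Int) - 1) ' ' = s.getD (k - 1) ' ' := by
      have : (k : Int) - 1 = ((k - 1 : Nat) : Int) := by omega
      rw [this, PySem.List.pyGetD_natCast]
    have hcur : PySem.List.pyGetD s (k : Int) ' ' = s[k] := by
      rw [PySem.List.pyGetD_natCast, getD_eq_getElem s k hkn]
    have hnext : s.getD ((k + 1) - 1) ' ' = s[k] := by
      simpa using getD_eq_getElem s k hkn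
    rw [hdrop, hrange]
    simp only [cuts, List.foldl_cons]
    obtain ⟨b, hb⟩ : ∃ x, PySem.Chars.isupper (s.getD (k - 1) ' ') = x := ⟨_, rfl⟩
    obtain ⟨u, hu⟩ : ∃ x, PySem.Chars.isupper s[k] = x := ⟨_, rfl⟩
    rw [hb, hu]
    have hb'' : PySem.Chars.isupper (s[k - 1]?.getD ' ') = b := by
      rw [← List.getD_eq_getElem?_getD]; exact hb
    by_cases h1 : u && !b
    · -- rising cut at k
      obtain ⟨hx, hy⟩ : u = true ∧ b = false := by simpa using h1
      have hne := slice_nonempty s l k (by omega) (by omega)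
      rw [List.foldl_append]
      have := ih (k + 1) k
        (items ++ [String.ofList (PySem.List.slice s (some (l : Int)) (some (k : Int)))])
        (by omega) (by omega) (by omega)
      rw [hnext, hu] at this
      simpa [aSlice, bStep, hcur, hprev, hb'', hu, hx, hy, h1, hne, ← hk1] using this
    · by_cases h2 : fall && !u && b
      · -- falling cut at k-1
        obtain ⟨⟨hf, hx⟩, hy⟩ : (fall = true ∧ u = false) ∧ b = true := by simpa using h2
        rw [List.foldl_append]
        have hkm1 : (k : Int) - 1 = ((k - 1 : Nat) : Int) := by omega
        by_cases hll : l < k - 1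
        · have hne := slice_nonempty s l (k - 1) hll (by omega)
          have hdec : (l : Int) < (k : Int) - 1 := by omega
          have hdec2 : (l : Int) < ((k - 1 : Nat) : Int) := by omega
          have := ih (k + 1) (k - 1)
            (items ++ [String.ofList (PySem.List.slice s (some (l : Int)) (some ((k - 1 : Nat) : Int)))])
            (by omega) (by omega) (by omega)
          rw [hnext, hu] at this
          simpa [aSlice, bStep, hcur, hprev, hb'', hu, hf, hx, hy, h1, h2, hne, hkm1, hdec, hdec2,
            ← hk1] using this
        · -- l = k - 1 : empty slice on A's side, guard false on B's side; state unchanged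
          have hlk : l = k - 1 := by omega
          have hemp : PySem.List.slice s (some ((k - 1 : Nat) : Int)) (some ((k - 1 : Nat) : Int)) = [] := by
            rw [PySem.List.slice_natCast]; simp
          have hge : ¬ ((l : Int) < (k : Int) - 1) := by omega
          have hge2 : ¬ ((l : Int) < ((k - 1 : Nat) : Int)) := by omega
          have := ih (k + 1) (k - 1) items (by omega) (by omega) (by omega)
          rw [hnext, hu] at this
          simpa [aSlice, bStep, hcur, hprev, hb'', hu, hf, hx, hy, h1, h2, hemp, hkm1, hge, hge2,
            hlk, ← hk1] using this
      · -- no cut here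
        have := ih (k + 1) l items (by omega) (by omega) (by omega)
        rw [hnext, hu] at this
        cases u <;> cases b <;> cases fall <;>
          first
            | exact absurd rfl h1
            | exact absurd rfl h2
            | simpa [bStep, hcur, hprev, hb'', hu, ← hk1] using this

-- ===== VERDICT (by name: the statement is the Claim_ definition above) =====
theorem split_camel_name_spec : Claim_equal_split_camel_name := by
  intro name fall _
  unfold Spec_split_camel_name split_camel_name split_camel_name_alt
  cases hs : name.toList with
  | nil => simp [PySem.List.pyRange, PySem.List.slice]
  | cons c cs =>
    have hcol := collect_eq fall (c :: cs) 0 (PySem.Chars.isupper c) []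
    have hc0 : cuts fall (c :: cs) 0 (PySem.Chars.isupper c)
        = cuts fall cs 1 (PySem.Chars.isupper c) := by
      cases h : PySem.Chars.isupper c <;> simp [cuts, h]
    have hmain := main_lemma fall (c :: cs) ((c :: cs).length - 1) 1 0 [] rfl (by omega) (by omega)
    simp only [Nat.cast_zero, Nat.cast_one, show (1 : Nat) - 1 = 0 from rfl,
      List.drop_succ_cons, List.drop_zero, List.getD_cons_zero] at hcol hmain
    show finTail (c :: cs) (List.foldl (aSlice (c :: cs)) (0, [])
        ((List.foldl (aCollect fall) (PySem.Chars.isupper c, []) (PySem.List.enumerate (c :: cs) 0)).2))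
      = finTail (c :: cs) (List.foldl (bStep (c :: cs) fall) (0, [])
        (PySem.List.pyRange 1 ((c :: cs).length : Int) 1))
    rw [hcol]
    simpa [hc0] using hmain
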